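-- pv_equiv track=rewrite | github.com/luornor/A2SV | AfricanCrossword.py | crosswordSolve
-- ===== SOURCE A (Python) =====
-- def crosswordSolve(grid,rows,cols):
--     # create a boolean grid to mark repeated letters in grid
--     cross_out = [[False for _ in range(cols)] for _ in range(rows)]
--     #for rows
--     # keep of track of counts of each letter for a row
--     for r in range(rows):
--         row_counts = {}
--         for c in range(cols):
--             current = grid[r][c]
--             row_counts[current] = row_counts.get(current,0)+1
--
--         # check if letter appears more than once in a row
--         # and mark its position in the cross_out  grid as True if it does
--         for c in range(cols):
--             if row_counts[grid[r][c]] > 1: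
--                 cross_out[r][c]=True
--     #For columns
--     #keep track of counts of each letter in a column
--     for c in range(cols):
--         col_counts = {}
--         for r in range(rows):
--             current = grid[r][c]
--             col_counts[current]=col_counts.get(current,0)+1
--
--         # check if letter appears more than once in a column
--         # and mark its position in the cross_out grid as True If it does
--         for r in range(rows):
--             letter = grid[r][c]
--             if col_counts[letter]>1:
--                 cross_out[r][c]=True
--
--     #create the encrypted word
--     encrypted_word = ""
--     for r in range(rows):
--         for c in range(cols):
--             if not cross_out[r][c]:
--                 encrypted_word+= grid[r][c]
--
--     return encrypted_word
-- ===== SOURCE B (Python) =====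
-- def crosswordSolve(grid, rows, cols):
--     # No frequency tables at all: decide each cell directly by scanning its own
--     # row and column for another occurrence of the same letter.
--     pieces = []
--     for r in range(rows):
--         for c in range(cols):
--             ch = grid[r][c]
--             if all(grid[r][k] != ch for k in range(cols) if k != c) and \
--                all(grid[k][c] != ch for k in range(rows) if k != r):
--                 pieces.append(ch)
--     return "".join(pieces)
-- ===== Notes on version B (the rewrite author's own statement) =====
-- stated objective: alternative
-- what changed: Drops A's count dictionaries and boolean cross_out grid entirely: B decides each cell by directly scanning the rest of its row and column for another occurrence of the same letter, appending survivors in one nested pass.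
import Mathlib
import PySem

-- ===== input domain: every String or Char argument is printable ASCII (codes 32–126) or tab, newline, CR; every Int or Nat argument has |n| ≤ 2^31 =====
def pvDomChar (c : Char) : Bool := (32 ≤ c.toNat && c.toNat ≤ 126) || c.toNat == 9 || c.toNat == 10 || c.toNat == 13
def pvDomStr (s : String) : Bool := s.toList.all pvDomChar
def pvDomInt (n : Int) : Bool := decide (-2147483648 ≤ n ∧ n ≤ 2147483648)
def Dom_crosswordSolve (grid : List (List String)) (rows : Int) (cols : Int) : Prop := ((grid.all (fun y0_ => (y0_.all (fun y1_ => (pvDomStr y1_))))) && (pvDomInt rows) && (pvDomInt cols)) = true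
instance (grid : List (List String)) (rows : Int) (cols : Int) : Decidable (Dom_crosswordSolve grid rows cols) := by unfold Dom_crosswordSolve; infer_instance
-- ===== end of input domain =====

-- B drops A's count dictionaries and cross_out grid: it decides each cell by directly scanning its row and column for another occurrence (alternative algorithm, not faster).


-- ===== PORT A =====
-- literal transliteration of A; string accumulation is done on List Char (exact; Lean's
-- String.append is opaque to the kernel), with String.ofList at the end.
def crosswordSolve (grid : List (List String)) (rows : Int) (cols : Int) : String :=
  -- cross_out = [[False for _ in range(cols)] for _ in range(rows)]
  let cross_out0 : List (List Bool) :=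
    (PySem.List.pyRange 0 rows 1).map (fun _ => (PySem.List.pyRange 0 cols 1).map (fun _ => false))
  -- rows pass
  let cross_out1 : List (List Bool) :=
    (PySem.List.pyRange 0 rows 1).foldl (fun cross_out r =>
      let row_counts : PySem.Dict String Int :=
        (PySem.List.pyRange 0 cols 1).foldl (fun d c =>
          let current := PySem.List.pyGetD (PySem.List.pyGetD grid r []) c ""
          d.insert current (d.getD current 0 + 1)) PySem.Dict.empty
      (PySem.List.pyRange 0 cols 1).foldl (fun co c =>
        if 1 < row_counts.getD (PySem.List.pyGetD (PySem.List.pyGetD grid r []) c "") 0 then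
          PySem.List.pySetD co r (PySem.List.pySetD (PySem.List.pyGetD co r []) c true)
        else co) cross_out) cross_out0
  -- columns pass
  let cross_out2 : List (List Bool) :=
    (PySem.List.pyRange 0 cols 1).foldl (fun cross_out c =>
      let col_counts : PySem.Dict String Int :=
        (PySem.List.pyRange 0 rows 1).foldl (fun d r =>
          let current := PySem.List.pyGetD (PySem.List.pyGetD grid r []) c ""
          d.insert current (d.getD current 0 + 1)) PySem.Dict.empty
      (PySem.List.pyRange 0 rows 1).foldl (fun co r =>
        let letter := PySem.List.pyGetD (PySem.List.pyGetD grid r []) c ""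
        if 1 < col_counts.getD letter 0 then
          PySem.List.pySetD co r (PySem.List.pySetD (PySem.List.pyGetD co r []) c true)
        else co) cross_out) cross_out1
  -- encrypted_word accumulation
  let encrypted : List Char :=
    (PySem.List.pyRange 0 rows 1).foldl (fun acc r =>
      (PySem.List.pyRange 0 cols 1).foldl (fun acc c =>
        if !(PySem.List.pyGetD (PySem.List.pyGetD cross_out2 r []) c false) then
          acc ++ (PySem.List.pyGetD (PySem.List.pyGetD grid r []) c "").toList
        else acc) acc) []
  String.ofList encrypted

-- ===== PORT B =====
-- transliteration of Source B: no tables — each cell is kept iff scanning the rest of its row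
-- and the rest of its column finds no other occurrence of its letter; survivors are
-- appended to `pieces` and joined.
def crosswordSolve_alt (grid : List (List String)) (rows : Int) (cols : Int) : String :=
  let pieces : List String :=
    (PySem.List.pyRange 0 rows 1).foldl (fun acc r =>
      (PySem.List.pyRange 0 cols 1).foldl (fun acc c =>
        let ch := PySem.List.pyGetD (PySem.List.pyGetD grid r []) c ""
        if (((PySem.List.pyRange 0 cols 1).filter (fun k => !(k == c))).all
              (fun k => !(PySem.List.pyGetD (PySem.List.pyGetD grid r []) k "" == ch))) &&
           (((PySem.List.pyRange 0 rows 1).filter (fun k => !(k == r))).all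
              (fun k => !(PySem.List.pyGetD (PySem.List.pyGetD grid k []) c "" == ch)))
        then acc ++ [ch] else acc) acc) []
  PySem.Str.join "" pieces

-- ===== PRECONDITION & SPEC =====
-- Pre_ excludes exactly the inputs on which Python A raises IndexError (a positive rows/cols
-- pair demanding more rows than grid has, or a demanded row shorter than cols).
def Pre_crosswordSolve (grid : List (List String)) (rows : Int) (cols : Int) : Prop :=
  0 < rows → 0 < cols →
    (rows.toNat ≤ grid.length ∧ ∀ row ∈ grid.take rows.toNat, cols.toNat ≤ row.length)
-- e.g. grid [["a", "a"], ["b", "c"]] with rows 2, cols 2 satisfies Pre_ (both programs return "bc" there).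
instance (grid : List (List String)) (rows : Int) (cols : Int) : Decidable (Pre_crosswordSolve grid rows cols) := by unfold Pre_crosswordSolve; infer_instance
def pvWitness_crosswordSolve : List (List String) × Int × Int := ([["a", "b"], ["c", "a"]], 2, 2)
def Spec_crosswordSolve (grid : List (List String)) (rows : Int) (cols : Int) (out : String) : Prop := out = crosswordSolve_alt grid rows cols
instance (grid : List (List String)) (rows : Int) (cols : Int) (out : String) : Decidable (Spec_crosswordSolve grid rows cols out) := by unfold Spec_crosswordSolve; infer_instance

-- ===== CLAIM (what is proved, stated in full; the proofs are below) =====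
def Claim_equal_crosswordSolve : Prop := ∀ (grid : List (List String)) (rows : Int) (cols : Int), Dom_crosswordSolve grid rows cols → Pre_crosswordSolve grid rows cols → Spec_crosswordSolve grid rows cols (crosswordSolve grid rows cols)

-- ===== LEMMAS AND PROOFS =====
theorem pv_pyRange_toNat (t : Int) :
    PySem.List.pyRange 0 t 1 = (List.range t.toNat).map (fun (k : Nat) => (k : Int)) := by
  rcases (by omega : 0 ≤ t ∨ t < 0) with h | h
  · have := PySem.List.pyRange_zero_natCast t.toNat
    rw [Int.toNat_of_nonneg h] at this
    exact this
  · have h1 : PySem.List.pyRange 0 t 1 = [] := by simp [PySem.List.pyRange]; omega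
    have h2 : t.toNat = 0 := by omega
    simp [h1, h2]

theorem pv_getD_set {α : Type} (l : List α) (i r : Nat) (x d : α) :
    (l.set r x).getD i d = if i = r ∧ r < l.length then x else l.getD i d := by
  simp [List.getD, List.getElem?_set]
  split_ifs <;> simp_all

theorem pv_intercalate_nil (css : List (List Char)) :
    (List.intersperse ([] : List Char) css).flatten = css.flatten := by
  induction css with
  | nil => simp
  | cons a t ih => cases t <;> simp_all [List.intersperse]

theorem pv_join_toList (ps : List String) :
    (PySem.Str.join "" ps).toList = (ps.map String.toList).flatten := by
  simp only [PySem.Str.join, String.toList_empty, String.toList_ofList]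
  exact pv_intercalate_nil _

theorem pv_foldl_inv {α σ : Type} (step : α → σ → α) (p : α → Prop)
    (h : ∀ a s, p a → p (step a s)) : ∀ (l : List σ) (a : α), p a → p (l.foldl step a) := by
  intro l
  induction l with
  | nil => intro a ha; exact ha
  | cons s t ih => intro a ha; exact ih _ (h a s ha)

theorem pv_pySetD_natCast {α : Type} (xs : List α) (n : Nat) (v : α) :
    PySem.List.pySetD xs (n : Int) v = xs.set n v := by
  simp only [PySem.List.pySetD, PySem.List.pySet?, PySem.List.pyIdx?]
  by_cases h : (n:Int) < xs.length
  · simp [h]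
  · have : xs.length ≤ n := by exact_mod_cast not_lt.mp h
    simp [h, List.set_eq_of_length_le this]
def pvMark (co : List (List Bool)) (r c : Nat) : List (List Bool) :=
  co.set r ((co.getD r []).set c true)
def pvAt (co : List (List Bool)) (i j : Nat) : Bool := (co.getD i []).getD j false
theorem pv_mark_length (co : List (List Bool)) (r c : Nat) :
    (pvMark co r c).length = co.length := by simp [pvMark]

theorem pv_mark_row_length (co : List (List Bool)) (r c i : Nat) :
    ((pvMark co r c).getD i []).length = (co.getD i []).length := by
  rw [show ((pvMark co r c).getD i []) = _ from rfl]
  simp only [pvMark, pv_getD_set]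
  split_ifs with h
  · rcases h with ⟨h1, _⟩; subst h1; simp
  · rfl

theorem pv_at_mark (co : List (List Bool)) (r c i j : Nat)
    (hr : r < co.length) (hc : c < (co.getD r []).length) :
    pvAt (pvMark co r c) i j = if i = r ∧ j = c then true else pvAt co i j := by
  simp only [pvAt, pvMark, pv_getD_set]
  by_cases hi : i = r
  · subst hi
    simp [hr, List.getElem?_set]
    by_cases hj : j = c
    · subst hj
      have hc2 : j < co[i].length := by rwa [List.getD_eq_getElem _ _ hr] at hc
      simp [hc2]
    · simp [hj, Ne.symm hj]
  · simp [hi]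

theorem pv_pass_row_at (P : Nat → Prop) [DecidablePred P] (r : Nat) :
    ∀ (n : Nat) (co : List (List Bool)), r < co.length → n ≤ (co.getD r []).length → ∀ i j,
      pvAt ((List.range n).foldl (fun co c => if P c then pvMark co r c else co) co) i j
        = (pvAt co i j || (decide (i = r) && decide (j < n) && decide (P j))) := by
  intro n
  induction n with
  | zero => simp
  | succ n ih =>
    intro co hr hn i j
    rw [List.range_succ, List.foldl_append]
    have dims := pv_foldl_inv (fun co c => if P c then pvMark co r c else co)
      (fun a => a.length = co.length ∧ ∀ k, (a.getD k []).length = (co.getD k []).length)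
      (by intro a s hp
          by_cases hPs : P s
          · simp only [hPs, if_pos]
            exact ⟨by rw [pv_mark_length, hp.1], fun k => by rw [pv_mark_row_length]; exact hp.2 k⟩
          · simpa [hPs] using hp)
      (List.range n) co ⟨rfl, fun _ => rfl⟩
    set co' := (List.range n).foldl (fun co c => if P c then pvMark co r c else co) co with hco'
    have hih := ih co hr (by omega) i j
    simp only [List.foldl_cons, List.foldl_nil]
    by_cases hP : P n
    · rw [if_pos hP]
      rw [pv_at_mark co' r n i j (by rw [dims.1]; exact hr) (by rw [dims.2 r]; omega)]
      rw [hih]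
      by_cases h1 : i = r
      · subst h1
        by_cases h2 : j = n
        · subst h2; simp [hP]
        · have hd : decide (j < n + 1) = decide (j < n) := by
            by_cases h3 : j < n <;> simp [h3] <;> omega
          rw [hd, if_neg (by simp [h2])]
      · simp [h1]
    · rw [if_neg hP, hih]
      by_cases h2 : j = n
      · subst h2; simp [hP]
      · have hd : decide (j < n + 1) = decide (j < n) := by
          by_cases h3 : j < n <;> simp [h3] <;> omega
        rw [hd]

theorem pv_pass_col_at (P : Nat → Prop) [DecidablePred P] (c : Nat) :
    ∀ (n : Nat) (co : List (List Bool)), n ≤ co.length →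
      (∀ i, i < n → c < (co.getD i []).length) → ∀ i j,
      pvAt ((List.range n).foldl (fun co r => if P r then pvMark co r c else co) co) i j
        = (pvAt co i j || (decide (i < n) && decide (j = c) && decide (P i))) := by
  intro n
  induction n with
  | zero => simp
  | succ n ih =>
    intro co hn hc i j
    rw [List.range_succ, List.foldl_append]
    have dims := pv_foldl_inv (fun co r => if P r then pvMark co r c else co)
      (fun a => a.length = co.length ∧ ∀ k, (a.getD k []).length = (co.getD k []).length)
      (by intro a s hp
          by_cases hPs : P s
          · simp only [hPs, if_pos]
            exact ⟨by rw [pv_mark_length, hp.1], fun k => by rw [pv_mark_row_length]; exact hp.2 k⟩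
          · simpa [hPs] using hp)
      (List.range n) co ⟨rfl, fun _ => rfl⟩
    set co' := (List.range n).foldl (fun co r => if P r then pvMark co r c else co) co with hco'
    have hih := ih co (by omega) (fun i hi => hc i (by omega)) i j
    simp only [List.foldl_cons, List.foldl_nil]
    by_cases hP : P n
    · rw [if_pos hP]
      rw [pv_at_mark co' n c i j (by rw [dims.1]; omega) (by rw [dims.2 n]; exact hc n (by omega))]
      rw [hih]
      by_cases h2 : j = c
      · subst h2
        by_cases h1 : i = n
        · subst h1; simp [hP]
        · have hd : decide (i < n + 1) = decide (i < n) := by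
            by_cases h3 : i < n <;> simp [h3] <;> omega
          rw [hd, if_neg (by simp [h1])]
      · simp [h2]
    · rw [if_neg hP, hih]
      by_cases h1 : i = n
      · subst h1; simp [hP]
      · have hd : decide (i < n + 1) = decide (i < n) := by
          by_cases h3 : i < n <;> simp [h3] <;> omega
        rw [hd]

def pvDims (a co : List (List Bool)) : Prop :=
  a.length = co.length ∧ ∀ k, (a.getD k []).length = (co.getD k []).length

theorem pv_ifmark_dims {σ : Type} (P : σ → Prop) [DecidablePred P] (rf cf : σ → Nat) (co : List (List Bool))
    (l : List σ) (a : List (List Bool)) (h : pvDims a co) :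
    pvDims (l.foldl (fun co s => if P s then pvMark co (rf s) (cf s) else co) a) co := by
  refine pv_foldl_inv _ (fun x => pvDims x co) ?_ l a h
  intro a s hp
  by_cases hPs : P s
  · simp only [hPs, if_pos]
    exact ⟨by rw [pv_mark_length, hp.1], fun k => by rw [pv_mark_row_length]; exact hp.2 k⟩
  · simpa [hPs] using hp

theorem pv_phase_rows_at (Q : Nat → Nat → Prop) [DecidableRel Q] (C : Nat) :
    ∀ (m : Nat) (co : List (List Bool)), m ≤ co.length →
      (∀ r, r < m → C ≤ (co.getD r []).length) → ∀ i j,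
      pvAt ((List.range m).foldl (fun co r =>
              (List.range C).foldl (fun co c => if Q r c then pvMark co r c else co) co) co) i j
        = (pvAt co i j || (decide (i < m) && decide (j < C) && decide (Q i j))) := by
  intro m
  induction m with
  | zero => simp
  | succ m ih =>
    intro co hm hc i j
    rw [List.range_succ, List.foldl_append]
    have dims : pvDims ((List.range m).foldl (fun co r =>
        (List.range C).foldl (fun co c => if Q r c then pvMark co r c else co) co) co) co := by
      refine pv_foldl_inv _ (fun x => pvDims x co) ?_ (List.range m) co ⟨rfl, fun _ => rfl⟩
      intro a r hp
      exact pv_ifmark_dims (Q r) (fun _ => r) (fun c => c) co (List.range C) a hp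
    set co' := (List.range m).foldl (fun co r =>
        (List.range C).foldl (fun co c => if Q r c then pvMark co r c else co) co) co with hco'
    simp only [List.foldl_cons, List.foldl_nil]
    rw [pv_pass_row_at (Q m) m C co' (by rw [dims.1]; omega)
      (by rw [dims.2 m]; exact hc m (by omega)) i j]
    rw [ih co (by omega) (fun r hr => hc r (by omega)) i j]
    by_cases h1 : i = m
    · subst h1; simp
    · have hd : decide (i ≤ m) = decide (i < m) := by
        by_cases h3 : i < m <;> simp [h3] <;> omega
      simp [h1, hd]

theorem pv_phase_cols_at (Q : Nat → Nat → Prop) [DecidableRel Q] (R : Nat) :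
    ∀ (m : Nat) (co : List (List Bool)), R ≤ co.length →
      (∀ i, i < R → m ≤ (co.getD i []).length) → ∀ i j,
      pvAt ((List.range m).foldl (fun co c =>
              (List.range R).foldl (fun co r => if Q r c then pvMark co r c else co) co) co) i j
        = (pvAt co i j || (decide (i < R) && decide (j < m) && decide (Q i j))) := by
  intro m
  induction m with
  | zero => simp
  | succ m ih =>
    intro co hm hc i j
    rw [List.range_succ, List.foldl_append]
    have dims : pvDims ((List.range m).foldl (fun co c =>
        (List.range R).foldl (fun co r => if Q r c then pvMark co r c else co) co) co) co := by
      refine pv_foldl_inv _ (fun x => pvDims x co) ?_ (List.range m) co ⟨rfl, fun _ => rfl⟩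
      intro a c hp
      exact pv_ifmark_dims (fun r => Q r c) (fun r => r) (fun _ => c) co (List.range R) a hp
    set co' := (List.range m).foldl (fun co c =>
        (List.range R).foldl (fun co r => if Q r c then pvMark co r c else co) co) co with hco'
    simp only [List.foldl_cons, List.foldl_nil]
    rw [pv_pass_col_at (fun r => Q r m) m R co' (by rw [dims.1]; omega)
      (fun i hi => by rw [dims.2 i]; exact Nat.lt_of_lt_of_le (by omega) (hc i hi)) i j]
    rw [ih co (by omega) (fun i hi => by have := hc i hi; omega) i j]
    by_cases h2 : j = m
    · subst h2; simp
    · have hd : decide (j ≤ m) = decide (j < m) := by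
        by_cases h3 : j < m <;> simp [h3] <;> omega
      simp [h2, hd]

def pvCStep (d : PySem.Dict String Int) (x : String) : PySem.Dict String Int :=
  d.insert x (d.getD x 0 + 1)
def pvCell (grid : List (List String)) (r c : Nat) : String := (grid.getD r []).getD c ""

theorem pv_abs_mark (co : List (List Bool)) (r c : Nat) :
    co.set r ((co.getD r []).set c true) = pvMark co r c := rfl

theorem pv_abs_cstep (d : PySem.Dict String Int) (x : String) :
    d.insert x (d.getD x 0 + 1) = pvCStep d x := rfl

theorem pv_abs_cell (grid : List (List String)) (r c : Nat) :
    (grid.getD r []).getD c "" = pvCell grid r c := rfl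

theorem pv_abs_at (co : List (List Bool)) (i j : Nat) :
    (co.getD i []).getD j false = pvAt co i j := rfl

theorem pv_foldl_append_ite {α β : Type} (p : α → Prop) [DecidablePred p] (g : α → List β) :
    ∀ (l : List α) (acc : List β),
      l.foldl (fun acc x => if p x then acc ++ g x else acc) acc
        = acc ++ (l.filter (fun x => decide (p x))).flatMap g := by
  intro l
  induction l with
  | nil => simp
  | cons a t ih =>
    intro acc
    simp only [List.foldl_cons, List.filter_cons]
    by_cases h : p a
    · simp [h, ih]
    · simp [h, ih]

theorem pv_cfold_count (l : List String) (s : String) :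
    (l.foldl pvCStep PySem.Dict.empty).getD s 0 = (l.count s : Int) := by
  have h := PySem.Dict.getD_foldl_insert_add_one l PySem.Dict.empty s
  simpa [pvCStep] using h

theorem pv_range_cfold_count (g : Nat → String) (n : Nat) (s : String) :
    ((List.range n).foldl (fun d k => pvCStep d (g k)) PySem.Dict.empty).getD s 0
      = (((List.range n).map g).count s : Int) := by
  rw [← List.foldl_map]
  exact pv_cfold_count _ _

theorem pv_at_const_false (R C i j : Nat) :
    pvAt ((List.range R).map (fun _ => (List.range C).map (fun _ => false))) i j = false := by
  unfold pvAt
  simp only [List.getD_eq_getElem?_getD, List.getElem?_map]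
  cases hx : (List.range R)[i]? with
  | none => rfl
  | some a =>
    simp only [Option.map_some, Option.getD_some, List.getElem?_map]
    cases hy : (List.range C)[j]? with
    | none => rfl
    | some b => rfl

theorem pv_flatMap_congr {α β : Type} (l : List α) (f g : α → List β)
    (h : ∀ a ∈ l, f a = g a) : l.flatMap f = l.flatMap g := by
  induction l with
  | nil => rfl
  | cons a t ih =>
    simp only [List.flatMap_cons]
    rw [h a (by simp), ih (fun a ha => h a (by simp [ha]))]

theorem pv_flatten_flatMap {α β : Type} (l : List α) (g : α → List (List β)) :
    (l.flatMap g).flatten = l.flatMap (fun a => (g a).flatten) := by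
  induction l with
  | nil => simp
  | cons a t ih => simp [ih]

theorem pv_count_le_one_iff (g : Nat → String) (n c : Nat) (hc : c < n) :
    ((List.range n).map g).count (g c) ≤ 1 ↔ ∀ k, k < n → k ≠ c → g k ≠ g c := by
  have hcnt : ((List.range n).map g).count (g c)
      = List.countP (fun k => g k == g c) (List.range n) := by
    simp [List.count_eq_countP, List.countP_map, Function.comp_def]
  rw [hcnt]
  constructor
  · intro h k hk hkc hgk
    have hmemc : c ∈ (List.range n).filter (fun k => g k == g c) := by
      simp [List.mem_filter, List.mem_range, hc]
    have hmemk : k ∈ (List.range n).filter (fun k => g k == g c) := by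
      simp [List.mem_filter, List.mem_range, hk, hgk]
    have hsub : ({k, c} : Finset ℕ) ⊆ ((List.range n).filter (fun k => g k == g c)).toFinset := by
      intro x hx
      simp only [Finset.mem_insert, Finset.mem_singleton] at hx
      rcases hx with rfl | rfl
      · rw [List.mem_toFinset]; exact hmemk
      · rw [List.mem_toFinset]; exact hmemc
    have h2 : 2 ≤ ((List.range n).filter (fun k => g k == g c)).toFinset.card := by
      calc 2 = ({k, c} : Finset ℕ).card := by
            rw [Finset.card_insert_of_notMem (by simpa using hkc), Finset.card_singleton]
        _ ≤ _ := Finset.card_le_card hsub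
    have h3 := List.toFinset_card_le ((List.range n).filter (fun k => g k == g c))
    rw [List.countP_eq_length_filter] at h
    omega
  · intro h
    have hmono : List.countP (fun k => g k == g c) (List.range n)
        ≤ List.countP (fun k => k == c) (List.range n) := by
      apply List.countP_mono_left
      intro x hx hpx
      simp only [List.mem_range] at hx
      simp only [beq_iff_eq] at hpx ⊢
      by_contra hne
      exact h x hx hne hpx
    have hcount : List.countP (fun k => k == c) (List.range n) ≤ 1 := by
      have h4 : List.count c (List.range n) ≤ 1 :=
        List.nodup_iff_count_le_one.mp (List.nodup_range (n := n)) c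
      simpa [List.count_eq_countP] using h4
    omega

theorem pv_scan_eq_count (g : Nat → String) (n c : Nat) (hc : c < n) :
    (((List.range n).filter (fun (k : Nat) => !((k : Int) == (c : Int)))).all (fun k => !(g k == g c)))
      = decide (((List.range n).map g).count (g c) ≤ 1) := by
  rw [Bool.eq_iff_iff]
  rw [decide_eq_true_eq, pv_count_le_one_iff g n c hc]
  simp only [List.all_eq_true, List.mem_filter, List.mem_range, Bool.not_eq_eq_eq_not,
    Bool.not_true, beq_eq_false_iff_ne, ne_eq, Int.natCast_inj]
  constructor
  · intro h k hk hkc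
    exact h k ⟨hk, hkc⟩
  · intro h k hk
    exact h k hk.1 hk.2

theorem pv_not_lt_int (m : Nat) : (!(decide (1 < (m : Int)))) = decide (m ≤ 1) := by
  by_cases h : m ≤ 1
  · have h2 : ¬ (1 < (m : Int)) := by omega
    simp [h, h2]
  · have h2 : 1 < (m : Int) := by omega
    simp [h, h2]

-- ===== VERDICT (by name: the statement is the Claim_ definition above) =====
theorem crosswordSolve_spec : Claim_equal_crosswordSolve := by
  intro grid rows cols _ _
  unfold Spec_crosswordSolve crosswordSolve crosswordSolve_alt
  simp only [pv_pyRange_toNat, List.foldl_map, List.map_map, List.filter_map,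
    List.all_map, Function.comp_def, PySem.List.pyGetD_natCast, pv_pySetD_natCast, pv_abs_cell,
    pv_abs_cstep, pv_abs_mark, pv_abs_at]
  set R := rows.toNat with hRdef
  set C := cols.toNat with hCdef
  -- shape both collection loops into flatMap/filter form
  simp only [pv_foldl_append_ite, PySem.List.foldl_append_eq_flatMap, List.nil_append]
  -- reduce the String goal to a List Char goal
  refine Eq.trans (congrArg String.ofList ?_) String.ofList_toList
  rw [pv_join_toList]
  simp only [List.map_flatMap, pv_flatten_flatMap,
    List.flatMap_cons, List.flatMap_nil, List.append_nil, ← List.flatMap_def]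
  refine pv_flatMap_congr _ _ _ ?_
  intro r hrm
  have hr : r < R := List.mem_range.1 hrm
  refine congrArg _ (List.filter_congr ?_)
  intro c hcm
  have hc : c < C := List.mem_range.1 hcm
  have hco0len : ((List.range R).map (fun _ => (List.range C).map (fun _ => false))).length = R := by
    simp
  have hco0row : ∀ i, i < R →
      (((List.range R).map (fun _ => (List.range C).map (fun _ => false))).getD i []).length = C := by
    intro i hi
    rw [List.getD_eq_getElem?_getD, List.getElem?_map, List.getElem?_range hi]
    simp
  have dims1 : pvDims ((List.range R).foldl (fun co r =>
      (List.range C).foldl (fun co c =>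
        if 1 < ((List.range C).foldl (fun d k => pvCStep d (pvCell grid r k))
            PySem.Dict.empty).getD (pvCell grid r c) 0 then pvMark co r c else co) co)
      ((List.range R).map (fun _ => (List.range C).map (fun _ => false))))
      ((List.range R).map (fun _ => (List.range C).map (fun _ => false))) := by
    refine pv_foldl_inv _ (fun x => pvDims x _) ?_ (List.range R) _ ⟨rfl, fun _ => rfl⟩
    intro a r' hp
    exact pv_ifmark_dims (fun c' => 1 < ((List.range C).foldl (fun d k => pvCStep d (pvCell grid r' k))
      PySem.Dict.empty).getD (pvCell grid r' c') 0) (fun _ => r') (fun c' => c') _ (List.range C) a hp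
  rw [pv_phase_cols_at (fun r' c' => 1 < ((List.range R).foldl (fun d k => pvCStep d (pvCell grid k c'))
        PySem.Dict.empty).getD (pvCell grid r' c') 0) R C _
      (by rw [dims1.1, hco0len]) (fun i hi => by rw [dims1.2 i, hco0row i hi]) r c]
  rw [pv_phase_rows_at (fun r' c' => 1 < ((List.range C).foldl (fun d k => pvCStep d (pvCell grid r' k))
        PySem.Dict.empty).getD (pvCell grid r' c') 0) C R _
      (le_of_eq hco0len.symm) (fun i hi => le_of_eq (hco0row i hi).symm) r c]
  rw [pv_at_const_false]
  rw [pv_range_cfold_count (pvCell grid r) C (pvCell grid r c),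
      pv_range_cfold_count (fun k => pvCell grid k c) R (pvCell grid r c)]
  rw [pv_scan_eq_count (pvCell grid r) C c hc,
      pv_scan_eq_count (fun k => pvCell grid k c) R r hr]
  simp [hr, hc, ← pv_not_lt_int]
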